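-- pv_equiv track=rewrite | github.com/daizhouchen/market-research-skill | skills/market-research/tools/report_exporter.py | preprocess_md
-- ===== SOURCE A (Python) =====
-- def preprocess_md(md_text: str) -> str:
--     """预处理 Markdown 文本，修复常见的解析问题。
--
--     Python markdown 库要求表格前必须有空行，否则无法识别为表格。
--     本函数确保每个表格（以 | 开头的行块）前面都有空行。
--
--     Args:
--         md_text: 原始 Markdown 文本
--
--     Returns:
--         预处理后的 Markdown 文本
--     """
--     lines = md_text.split("\n")
--     result = []
--     for i, line in enumerate(lines):
--         # 当前行是表格行（以 | 开头），但上一行不是空行也不是表格行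
--         if (
--             i > 0
--             and line.startswith("|")
--             and result
--             and result[-1].strip() != ""
--             and not result[-1].startswith("|")
--         ):
--             result.append("")  # 插入空行
--         result.append(line)
--     return "\n".join(result)
-- ===== SOURCE B (Python) =====
-- def preprocess_md(md_text: str) -> str:
--     """Single character-level pass: track whether the current line starts with '|'
--     and whether it has any non-whitespace char; at each newline, peek at the next
--     character and emit an extra blank line when a table row follows a non-blank,
--     non-table line."""
--     out = []
--     at_line_start = True
--     starts_pipe = False
--     has_content = False
--     for i, ch in enumerate(md_text):
--         if ch == "\n":
--             if i + 1 < len(md_text) and md_text[i + 1] == "|" and has_content and not starts_pipe: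
--                 out.append("\n")
--             at_line_start, starts_pipe, has_content = True, False, False
--         else:
--             if at_line_start:
--                 starts_pipe = ch == "|"
--                 at_line_start = False
--             if not ch.isspace():
--                 has_content = True
--         out.append(ch)
--     return "".join(out)
-- ===== Notes on version B (the rewrite author's own statement) =====
-- stated objective: alternative
-- what changed: Replaces A's split-into-lines loop that appends to a result list and inspects its last element with a single character-level scan that tracks per-line state (starts-with-pipe, has-content) and inserts the extra newline at each line boundary via one-character lookahead.
import Mathlib
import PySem

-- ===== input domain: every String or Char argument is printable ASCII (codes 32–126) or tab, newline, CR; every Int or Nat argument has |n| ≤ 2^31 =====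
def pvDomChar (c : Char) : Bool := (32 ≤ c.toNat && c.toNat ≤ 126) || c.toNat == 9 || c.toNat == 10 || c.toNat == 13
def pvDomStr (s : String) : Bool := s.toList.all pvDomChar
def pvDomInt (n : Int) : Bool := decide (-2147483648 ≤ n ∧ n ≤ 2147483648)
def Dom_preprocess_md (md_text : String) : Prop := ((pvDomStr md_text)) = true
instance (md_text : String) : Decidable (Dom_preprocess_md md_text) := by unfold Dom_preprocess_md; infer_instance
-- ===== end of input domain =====

-- B replaces A's line-split loop that appends to a result list and inspects its last
-- element by a single character-level scan with per-line state (alternative decomposition, same cost).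


-- ===== PORT A =====
-- one iteration of A's loop body: res is the result list built so far, p = (i, line);
-- res.getLastD [] is result[-1] (guarded by !res.isEmpty, exactly as A guards with `result`)
def pvAStep (res : List (List Char)) (p : Int × List Char) : List (List Char) :=
  let res' :=
    if p.1 > 0 && PySem.Chars.startswith p.2 ['|'] && !res.isEmpty
        && !decide (PySem.Chars.strip (res.getLastD []) = [])
        && !PySem.Chars.startswith (res.getLastD []) ['|']
    then res ++ [[]] else res
  res' ++ [p.2]


def preprocess_md (md_text : String) : String :=
  String.ofList (PySem.Chars.join ['\n']
    (List.foldl pvAStep [] (PySem.List.enumerate (PySem.Chars.splitOn md_text.toList ['\n']))))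

-- ===== PORT B =====
-- B's scan; the three Booleans are B's at_line_start / starts_pipe / has_content, and
-- `rest.head? = some '|'` is B's bounds-checked lookahead `i+1 < len(md_text) and md_text[i+1] == "|"`
def pvBGo (atStart startsPipe hasContent : Bool) : List Char → List Char
  | [] => []
  | c :: rest =>
    if c = '\n' then
      (if decide (rest.head? = some '|') && hasContent && !startsPipe then ['\n'] else [])
        ++ '\n' :: pvBGo true false false rest
    else
      c :: pvBGo false (if atStart then decide (c = '|') else startsPipe)
            (hasContent || !PySem.Chars.isspace c) rest


def preprocess_md_alt (md_text : String) : String :=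
  String.ofList (pvBGo true false false md_text.toList)

-- ===== PRECONDITION & SPEC =====
def Spec_preprocess_md (md_text : String) (out : String) : Prop := out = preprocess_md_alt md_text
instance (md_text : String) (out : String) : Decidable (Spec_preprocess_md md_text out) := by unfold Spec_preprocess_md; infer_instance

-- ===== CLAIM (what is proved, stated in full; the proofs are below) =====
def Claim_equal_preprocess_md : Prop := ∀ (md_text : String), Dom_preprocess_md md_text → Spec_preprocess_md md_text (preprocess_md md_text)

-- ===== LEMMAS AND PROOFS =====
def pvLines : List Char → List (List Char)
  | [] => [[]]
  | c :: rest => if c = '\n' then [] :: pvLines rest else (pvLines rest).modifyHead (c :: ·)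

theorem pvLines_ne_nil (cs : List Char) : pvLines cs ≠ [] := by
  induction cs with
  | nil => simp [pvLines]
  | cons c rest ih =>
    simp only [pvLines]; split
    · simp
    · cases h : pvLines rest with
      | nil => exact absurd h ih
      | cons a t => simp [List.modifyHead]

theorem pvSplitOn_go_spec (fuel : Nat) :
    ∀ (l cur : List Char) (accL : List (List Char)), l.length < fuel →
      PySem.Chars.splitOn.go ['\n'] fuel l cur accL
        = accL.reverse ++ (pvLines l).modifyHead (cur.reverse ++ ·) := by
  induction fuel with
  | zero => intro l cur accL h; omega
  | succ f ih =>
    intro l cur accL h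
    cases l with
    | nil => simp [PySem.Chars.splitOn.go, pvLines]
    | cons c rest =>
      simp only [PySem.Chars.splitOn.go]
      by_cases hc : c = '\n'
      · subst hc
        rw [if_pos (by simp [List.isPrefixOf])]
        simp only [List.length_cons] at h
        rw [ih _ _ _ (by simpa using Nat.lt_of_succ_lt_succ h)]
        simp only [pvLines, List.reverse_nil, List.nil_append]
        cases hp : pvLines rest with
        | nil => exact absurd hp (pvLines_ne_nil rest)
        | cons a t => simp [hp, List.modifyHead]
      · rw [if_neg (by simp [List.isPrefixOf]; exact fun e => hc e.symm)]
        simp only [List.length_cons] at h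
        rw [ih _ _ _ (Nat.lt_of_succ_lt_succ h)]
        simp only [pvLines, if_neg hc]
        cases hp : pvLines rest with
        | nil => exact absurd hp (pvLines_ne_nil rest)
        | cons a t => simp [List.modifyHead]

theorem pvSplitOn_eq (cs : List Char) :
    PySem.Chars.splitOn cs ['\n'] = pvLines cs := by
  rw [PySem.Chars.splitOn, pvSplitOn_go_spec _ _ _ _ (Nat.lt_succ_self _)]
  cases hp : pvLines cs with
  | nil => exact absurd hp (pvLines_ne_nil cs)
  | cons a t => simp [List.modifyHead]

theorem pvJoin_cons (a : List Char) (ls : List (List Char)) :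
    PySem.Chars.join ['\n'] (a :: ls) = a ++ (ls.map (fun l => '\n' :: l)).flatten := by
  induction ls generalizing a with
  | nil => simp [PySem.Chars.join, List.intercalate]
  | cons b t ih =>
    rw [PySem.Chars.join_cons_cons, ih b]
    simp

theorem pvJoin_pvLines (cs : List Char) :
    PySem.Chars.join ['\n'] (pvLines cs) = cs := by
  induction cs with
  | nil => simp [pvLines, PySem.Chars.join, List.intercalate]
  | cons c rest ih =>
    simp only [pvLines]
    by_cases hc : c = '\n'
    · subst hc
      rw [if_pos rfl, pvJoin_cons]
      cases hp : pvLines rest with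
      | nil => exact absurd hp (pvLines_ne_nil rest)
      | cons a t =>
        rw [hp] at ih
        rw [pvJoin_cons] at ih
        simp [ih]
    · rw [if_neg hc]
      cases hp : pvLines rest with
      | nil => exact absurd hp (pvLines_ne_nil rest)
      | cons a t =>
        rw [hp] at ih
        rw [pvJoin_cons] at ih
        simp [List.modifyHead, pvJoin_cons, ih]

theorem pvLines_no_nl (cs : List Char) : ∀ p ∈ pvLines cs, '\n' ∉ p := by
  induction cs with
  | nil => simp [pvLines]
  | cons c rest ih =>
    simp only [pvLines]
    by_cases hc : c = '\n'
    · subst hc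
      rw [if_pos rfl]
      intro p hp
      rcases List.mem_cons.mp hp with h | h
      · simp [h]
      · exact ih p h
    · rw [if_neg hc]
      cases hp : pvLines rest with
      | nil => exact absurd hp (pvLines_ne_nil rest)
      | cons a t =>
        rw [hp] at ih
        intro p hmem
        simp only [List.modifyHead] at hmem
        rcases List.mem_cons.mp hmem with h | h
        · subst h
          intro hm
          rcases List.mem_cons.mp hm with h | h
          · exact hc h.symm
          · exact ih a (by simp) h
        · exact ih p (List.mem_cons_of_mem _ h)

theorem pvStrip_nil_iff (p : List Char) :
    PySem.Chars.strip p = [] ↔ p.all PySem.Chars.isspace := by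
  simp only [PySem.Chars.strip, PySem.Chars.rstrip, PySem.Chars.lstrip]
  constructor
  · intro h
    have h2 : List.dropWhile PySem.Chars.isspace (List.dropWhile PySem.Chars.isspace p).reverse = [] := by
      simpa using congrArg List.reverse h
    have h3 := List.dropWhile_eq_nil_iff.mp h2
    have h4 : ∀ x ∈ List.dropWhile PySem.Chars.isspace p, PySem.Chars.isspace x := by
      intro x hx; exact h3 x (List.mem_reverse.mpr hx)
    rw [List.all_eq_true]
    intro x hx
    rw [← List.takeWhile_append_dropWhile (p := PySem.Chars.isspace) (l := p)] at hx
    rcases List.mem_append.mp hx with h | h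
    · exact List.mem_takeWhile_imp h
    · exact h4 x h
  · intro h
    have : List.dropWhile PySem.Chars.isspace p = [] :=
      List.dropWhile_eq_nil_iff.mpr (fun x hx => by
        rw [List.all_eq_true] at h; exact h x hx)
    simp [this]

def pvCond (prev cur : List Char) : Bool :=
  PySem.Chars.startswith cur ['|'] && !decide (PySem.Chars.strip prev = [])
    && !PySem.Chars.startswith prev ['|']

def pvIns (prev : List Char) : List (List Char) → List (List Char)
  | [] => []
  | c :: t => (if pvCond prev c then [[], c] else [c]) ++ pvIns c t

theorem pvFoldA (ls : List (List Char)) :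
    ∀ (k : Int) (acc : List (List Char)) (prev : List Char), 0 < k →
      List.foldl pvAStep (acc ++ [prev]) (PySem.List.enumerate ls k)
        = acc ++ [prev] ++ pvIns prev ls := by
  induction ls with
  | nil => intro k acc prev hk; simp [PySem.List.enumerate, pvIns]
  | cons c t ih =>
    intro k acc prev hk
    simp only [PySem.List.enumerate, List.foldl_cons]
    have hlast : (acc ++ [prev]).getLastD [] = prev := by simp
    have hne : (acc ++ [prev]).isEmpty = false := by simp
    have hkb : decide (k > 0) = true := by simpa using hk
    simp only [pvAStep, hlast, hne, hkb, Bool.true_and, Bool.not_false, Bool.and_true]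
    simp only [pvIns, pvCond]
    by_cases hcond : (PySem.Chars.startswith c ['|'] && !decide (PySem.Chars.strip prev = []) && !PySem.Chars.startswith prev ['|']) = true
    · rw [if_pos hcond, if_pos hcond]
      have := ih (k + 1) (acc ++ [prev] ++ [[]]) c (by omega)
      simp only [List.append_assoc] at this ⊢
      simpa using this
    · rw [if_neg hcond, if_neg hcond]
      have := ih (k + 1) (acc ++ [prev]) c (by omega)
      simp only [List.append_assoc] at this ⊢
      simpa using this

theorem pvA_eq (cs l0 : List Char) (ls : List (List Char)) (hp : pvLines cs = l0 :: ls) :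
    List.foldl pvAStep [] (PySem.List.enumerate (PySem.Chars.splitOn cs ['\n']))
      = l0 :: pvIns l0 ls := by
  rw [pvSplitOn_eq, hp]
  simp only [PySem.List.enumerate, List.foldl_cons]
  have h0 : pvAStep [] ((0 : Int), l0) = [] ++ [l0] := by simp [pvAStep]
  rw [h0, (by norm_num : (0:Int) + 1 = 1), pvFoldA ls 1 [] l0 (by omega)]
  simp

theorem pvStartswith_head (c : List Char) :
    PySem.Chars.startswith c ['|'] = decide (c.head? = some '|') := by
  cases c with
  | nil => simp [PySem.Chars.startswith, List.isPrefixOf]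
  | cons a t =>
    simp only [PySem.Chars.startswith, List.isPrefixOf, List.head?_cons]
    by_cases h : a = '|' <;> simp [h, BEq.comm]

theorem pvBGo_mid (l : List Char) :
    ∀ (ts : List Char) (sp hc : Bool), '\n' ∉ l →
      pvBGo false sp hc (l ++ ts)
        = l ++ pvBGo false sp (hc || l.any (fun c => !PySem.Chars.isspace c)) ts := by
  induction l with
  | nil => intro ts sp hc _; simp
  | cons c t ih =>
    intro ts sp hc hnl
    have hc' : c ≠ '\n' := by intro h; exact hnl (by simp [h])
    simp only [List.cons_append, pvBGo, if_neg hc', if_neg (by simp : ¬(false = true))]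
    rw [ih ts sp _ (fun h => hnl (List.mem_cons_of_mem _ h))]
    simp [List.any_cons, Bool.or_assoc]

theorem pvBGo_line (l ts : List Char) (h : '\n' ∉ l) :
    pvBGo true false false (l ++ ts)
      = l ++ pvBGo l.isEmpty (decide (l.head? = some '|')) (l.any (fun c => !PySem.Chars.isspace c)) ts := by
  cases l with
  | nil => simp
  | cons c t =>
    have hc' : c ≠ '\n' := by intro hh; exact h (by simp [hh])
    simp only [List.cons_append, pvBGo, if_neg hc']
    rw [pvBGo_mid t ts _ _ (fun hh => h (List.mem_cons_of_mem _ hh))]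
    simp [List.any_cons]

theorem pvBGo_main (ls : List (List Char)) :
    ∀ prev, (∀ p ∈ ls, '\n' ∉ p) → '\n' ∉ prev →
      pvBGo prev.isEmpty (decide (prev.head? = some '|')) (prev.any (fun c => !PySem.Chars.isspace c))
          ((ls.map (fun l => '\n' :: l)).flatten)
        = ((pvIns prev ls).map (fun l => '\n' :: l)).flatten := by
  induction ls with
  | nil => intro prev _ _; cases prev.isEmpty <;> simp [pvBGo, pvIns]
  | cons c t ih =>
    intro prev hno hprev
    have hcn : '\n' ∉ c := hno c (by simp)
    have htn : ∀ p ∈ t, '\n' ∉ p := fun p hp => hno p (List.mem_cons_of_mem _ hp)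
    -- the text seen by the scanner
    simp only [List.map_cons, List.flatten_cons]
    -- first char is the '\n' boundary
    have hstate : ∀ (b1 b2 b3 : Bool), pvBGo b1 b2 b3 ('\n' :: (c ++ (t.map (fun l => '\n' :: l)).flatten))
        = (if decide ((c ++ (t.map (fun l => '\n' :: l)).flatten).head? = some '|') && b3 && !b2 then ['\n'] else [])
          ++ '\n' :: pvBGo true false false (c ++ (t.map (fun l => '\n' :: l)).flatten) := by
      intro b1 b2 b3; simp [pvBGo]
    have h1 : decide (PySem.Chars.strip prev = []) = prev.all PySem.Chars.isspace := by
      by_cases hall : prev.all PySem.Chars.isspace = true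
      · simp [pvStrip_nil_iff, hall]
      · simp only [Bool.not_eq_true] at hall
        simp [pvStrip_nil_iff, hall]
    have h2 : prev.any (fun c => !PySem.Chars.isspace c) = !prev.all PySem.Chars.isspace := by
      rw [List.all_eq_not_any_not]; simp
    have hhead : decide ((c ++ (t.map (fun l => '\n' :: l)).flatten).head? = some '|')
        = PySem.Chars.startswith c ['|'] := by
      rw [pvStartswith_head]
      cases c with
      | cons a b => simp
      | nil =>
        cases t with
        | nil => simp
        | cons x xs => simp
    have hemit : (decide ((c ++ (t.map (fun l => '\n' :: l)).flatten).head? = some '|')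
        && prev.any (fun c => !PySem.Chars.isspace c) && !decide (prev.head? = some '|'))
        = pvCond prev c := by
      rw [hhead, h2, ← h1, ← pvStartswith_head]; rfl
    rw [List.cons_append]
    rw [hstate, hemit, pvBGo_line c _ hcn, ih c htn hcn]
    simp only [pvIns, List.map_append, List.flatten_append]
    by_cases hcd : pvCond prev c = true <;> simp [hcd]

-- ===== VERDICT (by name: the statement is the Claim_ definition above) =====
theorem preprocess_md_spec : Claim_equal_preprocess_md := by
  intro md _
  unfold Spec_preprocess_md preprocess_md preprocess_md_alt
  obtain ⟨l0, ls, hp⟩ : ∃ l0 ls, pvLines md.toList = l0 :: ls := by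
    cases h : pvLines md.toList with
    | nil => exact absurd h (pvLines_ne_nil _)
    | cons a t => exact ⟨a, t, rfl⟩
  have hno := pvLines_no_nl md.toList
  rw [hp] at hno
  have hl0 : '\n' ∉ l0 := hno l0 (by simp)
  have hls : ∀ p ∈ ls, '\n' ∉ p := fun p h => hno p (List.mem_cons_of_mem _ h)
  have hcs : md.toList = l0 ++ (ls.map (fun l => '\n' :: l)).flatten := by
    conv_lhs => rw [← pvJoin_pvLines md.toList]
    rw [hp, pvJoin_cons]
  rw [pvA_eq md.toList l0 ls hp, pvJoin_cons]
  conv_rhs => rw [hcs]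
  rw [pvBGo_line l0 _ hl0, pvBGo_main ls l0 hls hl0]
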